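-- pv_equiv track=rewrite | github.com/vitoegg/Provider | Script/Workflow/process_mosdns_rules.py | optimize_domains
-- ===== SOURCE A (Python) =====
-- from typing import Set, List, Tuple, Dict
--
-- def optimize_domains(rules: List[str]) -> Tuple[List[str], Dict[str, int]]:
--     """
--     优化域名规则，合并重复和包含关系的域名
--     返回: (优化后的规则列表, 统计信息)
--     """
--     stats = {
--         "total": len(rules),
--         "duplicates": 0,
--         "wildcard_covered": 0,
--         "exact_covered": 0,
--         "kept": 0
--     }
--
--     # 分离不同类型的规则
--     domain_rules = []  # domain:example.com
--     full_rules = []    # full:example.com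
--     other_rules = []   # 其他格式
--
--     for rule in rules:
--         if rule.startswith('domain:'):
--             domain_rules.append(rule[7:])  # 去掉 domain: 前缀
--         elif rule.startswith('full:'):
--             full_rules.append(rule)
--         else:
--             other_rules.append(rule)
--
--     # 去重
--     original_count = len(domain_rules) + len(full_rules) + len(other_rules)
--     domain_rules = list(set(domain_rules))
--     full_rules = list(set(full_rules))
--     other_rules = list(set(other_rules))
--
--     stats["duplicates"] = original_count - len(domain_rules) - len(full_rules) - len(other_rules)
--
--     # 优化domain规则
--     optimized_domains = []
--
--     # 按域名长度排序，短的在前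
--     sorted_domains = sorted(domain_rules, key=lambda x: (len(x.split('.')), x))
--
--     kept_domains = set()
--     for domain in sorted_domains:
--         is_covered = False
--         domain_parts = domain.split('.')
--
--         # 检查是否被已保留的更短域名覆盖
--         for i in range(1, len(domain_parts)):
--             parent_domain = '.'.join(domain_parts[i:])
--             if parent_domain in kept_domains:
--                 is_covered = True
--                 stats["wildcard_covered"] += 1
--                 break
--
--         if not is_covered:
--             kept_domains.add(domain)
--             optimized_domains.append(f"domain:{domain}")
--
--     # 合并所有优化后的规则
--     final_rules = optimized_domains + full_rules + other_rules
--     stats["kept"] = len(final_rules)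
--
--     return sorted(final_rules), stats
-- ===== SOURCE B (Python) =====
-- from typing import Set, List, Tuple, Dict
--
-- def optimize_domains(rules: List[str]) -> Tuple[List[str], Dict[str, int]]:
--     """
--     Merge duplicate and suffix-covered domain rules.
--     Single pass: a domain is wildcard-covered iff ANY proper dot-suffix of it
--     is present in the full distinct domain set (no sorting, no incremental
--     kept-set needed).
--     """
--     domains, full, other = set(), set(), set()
--     for rule in rules:
--         if rule.startswith('domain:'):
--             domains.add(rule[7:])
--         elif rule.startswith('full:'):
--             full.add(rule)
--         else:
--             other.add(rule)
--
--     kept = []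
--     for d in domains:
--         parts = d.split('.')
--         if not any('.'.join(parts[i:]) in domains for i in range(1, len(parts))):
--             kept.append("domain:" + d)
--
--     final_rules = sorted(kept + list(full) + list(other))
--     stats = {
--         "total": len(rules),
--         "duplicates": len(rules) - len(domains) - len(full) - len(other),
--         "wildcard_covered": len(domains) - len(kept),
--         "exact_covered": 0,
--         "kept": len(final_rules),
--     }
--     return final_rules, stats
-- ===== Notes on version B (the rewrite author's own statement) =====
-- stated objective: alternative
-- what changed: Replaces A's sort-by-part-count plus incremental kept-set greedy with a single unsorted pass that keeps a domain iff none of its proper dot-suffixes occurs in the full distinct domain set, computing wildcard_covered as a difference of set sizes.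
import Mathlib
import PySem

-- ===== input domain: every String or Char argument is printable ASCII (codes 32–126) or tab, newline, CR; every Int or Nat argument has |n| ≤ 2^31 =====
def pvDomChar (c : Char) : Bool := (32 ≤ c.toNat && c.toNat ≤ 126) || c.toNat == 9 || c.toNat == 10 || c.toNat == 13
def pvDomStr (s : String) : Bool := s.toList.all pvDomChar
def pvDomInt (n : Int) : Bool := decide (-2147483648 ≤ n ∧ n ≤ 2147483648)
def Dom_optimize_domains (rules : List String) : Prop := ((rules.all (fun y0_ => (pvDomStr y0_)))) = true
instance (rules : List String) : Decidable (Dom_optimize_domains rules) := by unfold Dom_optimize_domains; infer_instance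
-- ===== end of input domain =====

-- B replaces A's sort-by-part-count + incremental kept-set greedy by a single pass that keeps a
-- domain iff no proper dot-suffix of it is in the full distinct domain set (same return value).


-- ===== PORT A =====
-- d.split('.') — the separator "." is a nonempty literal, so split? is always `some`
def pvSplitDot (s : String) : List String := (PySem.Str.split? s ".").getD []

-- A's inner `for i in range(1, len(domain_parts)): if '.'.join(domain_parts[i:]) in kept_domains: … break`
-- (the loop only sets the flag once, so it is the first-hit scan of the proper suffixes)
def pvSufAny (kept : PySem.Set String) : List String → Bool
  | _ :: rest@(_ :: _) => kept.contains (PySem.Str.join "." rest) || pvSufAny kept rest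
  | _ => false

-- the stats dict's `wildcard_covered += 1` is carried as the Int component of the fold state;
-- the dict itself is assembled from it below, with inserts at the points Python assigns
def optimize_domains (rules : List String) : List String × (List (String × Int)) :=
  let part := rules.foldl (fun (s : List String × List String × List String) rule =>
      if PySem.Str.startswith rule "domain:" then (s.1 ++ [PySem.Str.slice rule (some 7) none], s.2.1, s.2.2)
      else if PySem.Str.startswith rule "full:" then (s.1, s.2.1 ++ [rule], s.2.2)
      else (s.1, s.2.1, s.2.2 ++ [rule])) ([], [], [])
  let originalCount : Int := (part.1.length : Int) + (part.2.1.length : Int) + (part.2.2.length : Int)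
  let domain_rules : PySem.Set String := PySem.Set.ofList part.1
  let full_rules : PySem.Set String := PySem.Set.ofList part.2.1
  let other_rules : PySem.Set String := PySem.Set.ofList part.2.2
  let duplicates : Int := originalCount - (domain_rules.length : Int) - (full_rules.length : Int) - (other_rules.length : Int)
  let sorted_domains := PySem.List.sorted2 domain_rules (fun x => (pvSplitDot x).length) (fun x => x)
  let g := sorted_domains.foldl (fun (st : PySem.Set String × List String × Int) domain =>
      if pvSufAny st.1 (pvSplitDot domain) then (st.1, st.2.1, st.2.2 + 1)
      else (PySem.Set.add st.1 domain, st.2.1 ++ ["domain:" ++ domain], st.2.2)) ([], [], 0)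
  let final_rules := g.2.1 ++ full_rules ++ other_rules
  let stats : PySem.Dict String Int :=
    ((((((((PySem.Dict.empty.insert "total" (rules.length : Int)).insert "duplicates" 0).insert
      "wildcard_covered" 0).insert "exact_covered" 0).insert "kept" 0).insert "duplicates" duplicates).insert
      "wildcard_covered" (0 + g.2.2)).insert "kept" (final_rules.length : Int))
  (PySem.List.sorted final_rules (fun x => x), stats.items)

-- ===== PORT B =====
-- B's `any('.'.join(parts[i:]) in domains for i in range(1, len(parts)))`
def pvCoveredB (domains : PySem.Set String) (d : String) : Bool :=
  let parts := pvSplitDot d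
  (PySem.List.pyRange 1 (parts.length : Int) 1).any fun i =>
    domains.contains (PySem.Str.join "." (PySem.List.slice parts (some i) none))

def optimize_domains_alt (rules : List String) : List String × (List (String × Int)) :=
  let part := rules.foldl (fun (s : PySem.Set String × PySem.Set String × PySem.Set String) rule =>
      if PySem.Str.startswith rule "domain:" then (s.1.add (PySem.Str.slice rule (some 7) none), s.2.1, s.2.2)
      else if PySem.Str.startswith rule "full:" then (s.1, s.2.1.add rule, s.2.2)
      else (s.1, s.2.1, s.2.2.add rule)) (PySem.Set.empty, PySem.Set.empty, PySem.Set.empty)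
  let domains := part.1
  let kept := (domains.filter (fun d => !pvCoveredB domains d)).map (fun d => "domain:" ++ d)
  let final := PySem.List.sorted (kept ++ part.2.1 ++ part.2.2) (fun x => x)
  (final,
   [("total", (rules.length : Int)),
    ("duplicates", (rules.length : Int) - (domains.length : Int) - (part.2.1.length : Int) - (part.2.2.length : Int)),
    ("wildcard_covered", (domains.length : Int) - (kept.length : Int)),
    ("exact_covered", 0),
    ("kept", (final.length : Int))])

-- ===== PRECONDITION & SPEC =====
def Spec_optimize_domains (rules : List String) (out : List String × (List (String × Int))) : Prop := out = optimize_domains_alt rules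
instance (rules : List String) (out : List String × (List (String × Int))) : Decidable (Spec_optimize_domains rules out) := by unfold Spec_optimize_domains; infer_instance

-- ===== CLAIM (what is proved, stated in full; the proofs are below) =====
def Claim_equal_optimize_domains : Prop := ∀ (rules : List String), Dom_optimize_domains rules → Spec_optimize_domains rules (optimize_domains rules)

-- ===== LEMMAS AND PROOFS =====

def splitCh : List Char → List Char × List (List Char)
  | [] => ([], [])
  | c :: rest =>
      let r := splitCh rest
      if c = '.' then ([], r.1 :: r.2) else (c :: r.1, r.2)

theorem go_spec : ∀ (fuel : Nat) (l cur : List Char) (acc : List (List Char)),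
    l.length < fuel →
    PySem.Chars.splitOn.go ['.'] fuel l cur acc
      = acc.reverse ++ (cur.reverse ++ (splitCh l).1) :: (splitCh l).2 := by
  intro fuel
  induction fuel with
  | zero => intro l cur acc h; omega
  | succ n ih =>
    intro l cur acc h
    cases l with
    | nil => simp [PySem.Chars.splitOn.go, splitCh]
    | cons c rest =>
      rw [PySem.Chars.splitOn.go]
      by_cases hc : c = '.'
      · subst hc
        simp only [List.isPrefixOf, Bool.and_true, beq_self_eq_true, if_pos, List.length_cons,
          List.drop_succ_cons]
        rw [ih _ _ _ (by simpa using Nat.lt_of_succ_lt_succ h)]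
        simp [splitCh]
      · have hp : List.isPrefixOf ['.'] (c :: rest) = false := by
          simp [List.isPrefixOf]; exact fun h' => (hc h'.symm).elim
        rw [hp]
        simp only [Bool.false_eq_true, if_false]
        rw [ih _ _ _ (by simpa using Nat.lt_of_succ_lt_succ h)]
        simp [splitCh, hc]

theorem splitOn_dot (l : List Char) :
    PySem.Chars.splitOn l ['.'] = (splitCh l).1 :: (splitCh l).2 := by
  rw [PySem.Chars.splitOn, go_spec _ _ _ _ (by omega)]; simp

-- pieces are dot-free
theorem splitCh_dotfree : ∀ l : List Char, ('.' ∉ (splitCh l).1) ∧ ∀ p ∈ (splitCh l).2, '.' ∉ p := by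
  intro l
  induction l with
  | nil => simp [splitCh]
  | cons c rest ih =>
    by_cases hc : c = '.'
    · subst hc; simp [splitCh]; exact ⟨ih.1, ih.2⟩
    · simp [splitCh, hc]
      exact ⟨⟨fun h => hc h.symm, ih.1⟩, ih.2⟩

theorem splitCh_of_dotfree : ∀ p : List Char, '.' ∉ p → splitCh p = (p, []) := by
  intro p
  induction p with
  | nil => simp [splitCh]
  | cons c rest ih =>
    intro h
    simp only [List.mem_cons, not_or] at h
    simp [splitCh, ih h.2]
    exact fun hh => h.1 hh.symm

theorem splitCh_append (p l : List Char) (hp : '.' ∉ p) :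
    splitCh (p ++ l) = (p ++ (splitCh l).1, (splitCh l).2) := by
  induction p with
  | nil => simp
  | cons c rest ih =>
    simp only [List.mem_cons, not_or] at hp
    simp [splitCh, ih hp.2]
    exact fun hh => hp.1 hh.symm

theorem splitCh_intercalate : ∀ (ps : List (List Char)) (p : List Char), '.' ∉ p →
    (∀ q ∈ ps, '.' ∉ q) →
    splitCh (List.intercalate ['.'] (p :: ps)) = (p, ps) := by
  intro ps
  induction ps with
  | nil => intro p hp _; simpa [List.intercalate] using splitCh_of_dotfree p hp
  | cons q ps ih =>
    intro p hp hq
    have : List.intercalate ['.'] (p :: q :: ps) = p ++ '.' :: List.intercalate ['.'] (q :: ps) := by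
      simp [List.intercalate, List.intersperse]
    rw [this, splitCh_append _ _ hp]
    have := ih q (hq q (by simp)) (fun r hr => hq r (by simp [hr]))
    simp [splitCh, this]

def sufS : List String → List String
  | _ :: rest@(_ :: _) => PySem.Str.join "." rest :: sufS rest
  | _ => []

theorem pvSplitDot_eq (s : String) :
    pvSplitDot s = String.ofList (splitCh s.toList).1 :: ((splitCh s.toList).2).map String.ofList := by
  have hsep : (".").toList = ['.'] := by decide
  simp [pvSplitDot, PySem.Str.split?, PySem.Chars.split?, hsep, splitOn_dot]

theorem pvSplitDot_ne_nil (s : String) : pvSplitDot s ≠ [] := by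
  simp [pvSplitDot_eq]

theorem mem_pvSplitDot_dotfree (s : String) (p : String) (hp : p ∈ pvSplitDot s) :
    '.' ∉ p.toList := by
  rw [pvSplitDot_eq] at hp
  rcases List.mem_cons.1 hp with h | h
  · subst h; simpa using (splitCh_dotfree s.toList).1
  · rcases List.mem_map.1 h with ⟨q, hq, rfl⟩
    simpa using (splitCh_dotfree s.toList).2 q hq

theorem pvSplitDot_join (parts : List String) (h : parts ≠ [])
    (hdf : ∀ p ∈ parts, '.' ∉ p.toList) :
    pvSplitDot (PySem.Str.join "." parts) = parts := by
  cases parts with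
  | nil => exact absurd rfl h
  | cons p ps =>
    have hsep : (".").toList = ['.'] := by decide
    have htl : (PySem.Str.join "." (p :: ps)).toList
        = List.intercalate ['.'] (p.toList :: ps.map String.toList) := by
      simp [PySem.Str.join, PySem.Chars.join, hsep]
    have hch : splitCh (PySem.Str.join "." (p :: ps)).toList = (p.toList, ps.map String.toList) := by
      rw [htl]
      exact splitCh_intercalate _ _ (hdf p (by simp))
        (by rintro q hq; rcases List.mem_map.1 hq with ⟨r, hr, rfl⟩; exact hdf r (by simp [hr]))
    rw [pvSplitDot_eq, hch]
    simp [List.map_map, Function.comp_def]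

theorem mem_sufS : ∀ (parts : List String) (s : String),
    s ∈ sufS parts ↔ ∃ j : Nat, 1 ≤ j ∧ j < parts.length ∧ s = PySem.Str.join "." (parts.drop j) := by
  intro parts
  induction parts with
  | nil => intro s; simp [sufS]
  | cons p rest ih =>
    intro s
    cases rest with
    | nil => simp [sufS]
    | cons q t =>
      rw [sufS]
      simp only [List.mem_cons, ih s]
      constructor
      · rintro (rfl | ⟨j, h1, h2, rfl⟩)
        · exact ⟨1, le_refl 1, by simp, by simp⟩
        · exact ⟨j + 1, by omega, by simp at h2 ⊢; omega, by simp⟩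
      · rintro ⟨j, h1, h2, rfl⟩
        match j, h1 with
        | 1, _ => left; simp
        | (k+2), _ =>
          right
          exact ⟨k + 1, by omega, by simp at h2 ⊢; omega, by simp⟩

def plen (d : String) : Nat := (pvSplitDot d).length

def pvP (S : List String) (d : String) : Bool :=
  (sufS (pvSplitDot d)).any (fun s => PySem.Set.contains S s)

theorem pvP_iff (S : List String) (d : String) :
    pvP S d = true ↔ ∃ s ∈ sufS (pvSplitDot d), s ∈ S := by
  simp [pvP, PySem.Set.contains, List.any_eq_true]

theorem suffix_split (d s : String) (hs : s ∈ sufS (pvSplitDot d)) :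
    ∃ j : Nat, 1 ≤ j ∧ j < plen d ∧ pvSplitDot s = (pvSplitDot d).drop j := by
  rcases (mem_sufS _ s).1 hs with ⟨j, h1, h2, rfl⟩
  refine ⟨j, h1, h2, ?_⟩
  apply pvSplitDot_join
  · intro h
    have := congrArg List.length h
    simp at this
    omega
  · intro p hp
    exact mem_pvSplitDot_dotfree d p (List.drop_subset _ _ hp)

theorem plen_lt_of_mem_sufS (d s : String) (hs : s ∈ sufS (pvSplitDot d)) : plen s < plen d := by
  rcases suffix_split d s hs with ⟨j, h1, h2, heq⟩
  have h3 : plen s = plen d - j := by simp [plen, heq]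
  omega

theorem sufS_sub (d s : String) (hs : s ∈ sufS (pvSplitDot d)) :
    ∀ t ∈ sufS (pvSplitDot s), t ∈ sufS (pvSplitDot d) := by
  rcases suffix_split d s hs with ⟨j, h1, h2, heq⟩
  intro t ht
  rw [heq] at ht
  rcases (mem_sufS _ t).1 ht with ⟨i, hi1, hi2, rfl⟩
  refine (mem_sufS _ _).2 ⟨j + i, by omega, ?_, ?_⟩
  · simp [plen] at h2 ⊢
    simp at hi2
    omega
  · rw [List.drop_drop]

theorem cov_elim (S : List String) : ∀ (n : Nat) (d : String), plen d ≤ n →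
    (∃ s ∈ sufS (pvSplitDot d), s ∈ S) →
    ∃ s ∈ sufS (pvSplitDot d), s ∈ S ∧ pvP S s = false ∧ plen s < plen d := by
  intro n
  induction n with
  | zero =>
    intro d hd
    have := pvSplitDot_ne_nil d
    have : plen d ≠ 0 := by simpa [plen, List.length_eq_zero_iff] using this
    omega
  | succ n ih =>
    intro d hd ⟨s, hs, hsS⟩
    by_cases hp : pvP S s = true
    · rcases (pvP_iff S s).1 hp with ⟨t, ht, htS⟩
      have hlt : plen s < plen d := plen_lt_of_mem_sufS d s hs
      rcases ih s (by omega) ⟨t, ht, htS⟩ with ⟨u, hu, huS, huP, hulen⟩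
      exact ⟨u, sufS_sub d s hs u hu, huS, huP, by omega⟩
    · exact ⟨s, hs, hsS, by simpa using hp, plen_lt_of_mem_sufS d s hs⟩

theorem sufAny_eq_any (K : PySem.Set String) : ∀ parts : List String,
    pvSufAny K parts = (sufS parts).any (fun s => K.contains s) := by
  intro parts
  induction parts with
  | nil => simp [pvSufAny, sufS]
  | cons p rest ih =>
    cases rest with
    | nil => simp [pvSufAny, sufS]
    | cons q t => simp [pvSufAny, sufS, ih]

theorem coveredB_eq (S : PySem.Set String) (d : String) : pvCoveredB S d = pvP S d := by
  rw [Bool.eq_iff_iff]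
  simp only [pvCoveredB, pvP, List.any_eq_true, PySem.List.mem_pyRange_one]
  constructor
  · rintro ⟨i, ⟨h1, h2⟩, hc⟩
    refine ⟨PySem.Str.join "." ((pvSplitDot d).drop i.toNat), ?_, hc ▸ ?_⟩
    · exact (mem_sufS _ _).2 ⟨i.toNat, by omega, by omega, rfl⟩
    · rw [PySem.List.slice_from _ (by omega)]
  · rintro ⟨s, hs, hc⟩
    rcases (mem_sufS _ s).1 hs with ⟨j, h1, h2, rfl⟩
    refine ⟨(j : Int), ⟨by omega, by omega⟩, ?_⟩
    rw [PySem.List.slice_from _ (by omega)]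
    simpa using hc

-- `kept ∈ done.filter (!pvP S ·)` membership vs the full set: the heart of the equivalence
theorem cov_kept_iff (S done : List String) (d : String)
    (hsubset : ∀ x ∈ done, x ∈ S)
    (hdone : ∀ s ∈ S, plen s < plen d → s ∈ done) :
    pvSufAny (done.filter (fun x => !pvP S x)) (pvSplitDot d) = pvP S d := by
  rw [sufAny_eq_any, Bool.eq_iff_iff]
  simp only [List.any_eq_true, pvP_iff, PySem.Set.contains, List.contains_iff_mem]
  constructor
  · rintro ⟨s, hs, hmem⟩
    exact ⟨s, hs, hsubset s (List.mem_of_mem_filter hmem)⟩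
  · rintro ⟨s, hs, hmem⟩
    rcases cov_elim S (plen d) d (le_refl _) ⟨s, hs, hmem⟩ with ⟨u, hu, huS, huP, hulen⟩
    refine ⟨u, hu, List.mem_filter.2 ⟨hdone u huS hulen, by simp [huP]⟩⟩

-- insertion sort produces a list pairwise-ordered by `before`
theorem insertBy_pairwise {α : Type} (before : α → α → Bool)
    (tr : ∀ a b c, before a b = true → before b c = true → before a c = true)
    (asym : ∀ a b, before a b = true → before b a = false)
    (x : α) : ∀ ys : List α, ys.Pairwise (fun a b => before b a = false) →
    (PySem.List.insertBy before x ys).Pairwise (fun a b => before b a = false) := by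
  intro ys
  induction ys with
  | nil => simp [PySem.List.insertBy]
  | cons y ys ih =>
    intro hp
    rw [List.pairwise_cons] at hp
    rw [PySem.List.insertBy]
    by_cases hb : before x y = true
    · rw [if_pos hb]
      refine List.Pairwise.cons ?_ (List.Pairwise.cons hp.1 hp.2)
      intro z hz
      rcases List.mem_cons.1 hz with rfl | hz
      · exact asym _ _ hb
      · by_contra hzx
        have hzx' : before z x = true := by simpa using hzx
        have := tr z x y hzx' hb
        rw [hp.1 z hz] at this
        exact Bool.false_ne_true this
    · rw [if_neg hb]
      refine List.Pairwise.cons ?_ (ih hp.2)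
      intro z hz
      rcases (PySem.List.mem_insertBy before x z ys).1 hz with rfl | hz
      · simpa using hb
      · exact hp.1 z hz

theorem foldl_insertBy_pairwise {α : Type} (before : α → α → Bool)
    (tr : ∀ a b c, before a b = true → before b c = true → before a c = true)
    (asym : ∀ a b, before a b = true → before b a = false) :
    ∀ (xs acc : List α), acc.Pairwise (fun a b => before b a = false) →
    (xs.foldl (fun acc x => PySem.List.insertBy before x acc) acc).Pairwise
      (fun a b => before b a = false) := by
  intro xs
  induction xs with
  | nil => intro acc h; simpa
  | cons x xs ih => intro acc h; exact ih _ (insertBy_pairwise before tr asym x acc h)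

theorem sorted2_pairwise_plen (xs : List String) :
    (PySem.List.sorted2 xs (fun x => plen x) (fun x => x) false).Pairwise
      (fun a b => plen a ≤ plen b) := by
  have h := foldl_insertBy_pairwise
    (fun a b => decide (plen a < plen b) || (!decide (plen b < plen a) && decide ((fun x => x) a < (fun x => x) b)))
    (by
      intro a b c h1 h2
      simp only [Bool.or_eq_true, Bool.and_eq_true, Bool.not_eq_true', decide_eq_true_eq,
        decide_eq_false_iff_not] at h1 h2 ⊢
      rcases h1 with h1 | ⟨h1a, h1b⟩ <;> rcases h2 with h2 | ⟨h2a, h2b⟩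
      · left; omega
      · left; omega
      · left; omega
      · right; exact ⟨by omega, lt_trans h1b h2b⟩)
    (by
      intro a b h
      simp only [Bool.or_eq_true, Bool.and_eq_true, Bool.not_eq_true', decide_eq_true_eq,
        decide_eq_false_iff_not] at h
      simp only [Bool.or_eq_false_iff, Bool.and_eq_false_iff, Bool.not_eq_false',
        decide_eq_false_iff_not, decide_eq_true_eq]
      rcases h with h | ⟨ha, hb⟩
      · exact ⟨by omega, Or.inl (by omega)⟩
      · exact ⟨ha, Or.inr (lt_asymm hb)⟩)
    xs [] (by simp)
  have heq : PySem.List.sorted2 xs (fun x => plen x) (fun x => x) false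
      = xs.foldl (fun acc x => PySem.List.insertBy
          (fun a b => decide (plen a < plen b) || (!decide (plen b < plen a) && decide ((fun x => x) a < (fun x => x) b))) x acc) [] := rfl
  rw [heq]
  refine h.imp ?_
  intro a b hab
  simp only [Bool.or_eq_false_iff, decide_eq_false_iff_not] at hab
  omega

theorem greedy_go (S : List String) (hS : S.Nodup) :
    ∀ (todo done out : List String) (w : Int),
    (done ++ todo).Perm S →
    (done ++ todo).Pairwise (fun a b => plen a ≤ plen b) →
    todo.foldl (fun (st : PySem.Set String × List String × Int) domain =>
        if pvSufAny st.1 (pvSplitDot domain) then (st.1, st.2.1, st.2.2 + 1)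
        else (PySem.Set.add st.1 domain, st.2.1 ++ ["domain:" ++ domain], st.2.2))
      (done.filter (fun x => !pvP S x), out, w)
    = ((done ++ todo).filter (fun x => !pvP S x),
       out ++ ((todo.filter (fun x => !pvP S x)).map (fun d => "domain:" ++ d)),
       w + (todo.countP (fun x => pvP S x) : Int)) := by
  intro todo
  induction todo with
  | nil => intro done out w hperm hpair; simp
  | cons d todo ih =>
    intro done out w hperm hpair
    have hnodup : (done ++ d :: todo).Nodup := hperm.nodup_iff.mpr hS
    have hdnotdone : d ∉ done := by
      have hnot := (List.pairwise_cons.1 (List.nodup_middle.1 hnodup)).1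
      exact fun h => (hnot d (List.mem_append_left _ h)) rfl
    have hsubset : ∀ x ∈ done, x ∈ S := fun x hx => hperm.subset (by simp [hx])
    have hdone : ∀ s ∈ S, plen s < plen d → s ∈ done := by
      intro s hsS hlt
      have hmem : s ∈ done ++ d :: todo := hperm.mem_iff.2 hsS
      rcases List.mem_append.1 hmem with h | h
      · exact h
      · rcases List.mem_cons.1 h with rfl | h
        · omega
        · have hpt : (d :: todo).Pairwise (fun a b => plen a ≤ plen b) :=
            (List.pairwise_append.1 hpair).2.1
          have := (List.pairwise_cons.1 hpt).1 s h
          omega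
    rw [List.foldl_cons, cov_kept_iff S done d hsubset hdone]
    by_cases hd : pvP S d = true
    · rw [hd]
      simp only [if_true]
      have hfe : (done ++ [d]).filter (fun x => !pvP S x) = done.filter (fun x => !pvP S x) := by
        simp [List.filter_append, hd]
      have := ih (done ++ [d]) out (w + 1) (by simpa using hperm) (by simpa using hpair)
      rw [hfe] at this
      rw [this]
      refine Prod.ext ?_ (Prod.ext ?_ ?_)
      · simp
      · simp [hd]
      · simp only [List.countP_cons, hd]
        push_cast
        ring
    · rw [if_neg (by simp [hd])]
      have hdB : pvP S d = false := by simpa using hd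
      have hnotin : d ∉ done.filter (fun x => !pvP S x) := fun h => hdnotdone (List.mem_of_mem_filter h)
      have hadd : PySem.Set.add (done.filter (fun x => !pvP S x)) d
          = (done ++ [d]).filter (fun x => !pvP S x) := by
        rw [PySem.Set.add]
        rw [if_neg (by simpa [PySem.Set.contains, List.contains_iff_mem] using hnotin)]
        simp [List.filter_append, hdB]
      rw [hadd]
      have := ih (done ++ [d]) (out ++ ["domain:" ++ d]) w (by simpa using hperm) (by simpa using hpair)
      rw [this]
      refine Prod.ext ?_ (Prod.ext ?_ ?_)
      · simp
      · simp [hdB]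
      · simp [hdB]

-- ===== assembly =====

theorem ofList_append_singleton {α : Type} [BEq α] (l : List α) (x : α) :
    PySem.Set.ofList (l ++ [x]) = PySem.Set.add (PySem.Set.ofList l) x := by
  rw [PySem.Set.ofList_eq_foldl, PySem.Set.ofList_eq_foldl, List.foldl_append]
  rfl

theorem part_eq : ∀ (rules dl fl ol : List String),
    rules.foldl (fun (s : PySem.Set String × PySem.Set String × PySem.Set String) rule =>
      if PySem.Str.startswith rule "domain:" then (s.1.add (PySem.Str.slice rule (some 7) none), s.2.1, s.2.2)
      else if PySem.Str.startswith rule "full:" then (s.1, s.2.1.add rule, s.2.2)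
      else (s.1, s.2.1, s.2.2.add rule))
      (PySem.Set.ofList dl, PySem.Set.ofList fl, PySem.Set.ofList ol)
    = (PySem.Set.ofList (rules.foldl (fun (s : List String × List String × List String) rule =>
          if PySem.Str.startswith rule "domain:" then (s.1 ++ [PySem.Str.slice rule (some 7) none], s.2.1, s.2.2)
          else if PySem.Str.startswith rule "full:" then (s.1, s.2.1 ++ [rule], s.2.2)
          else (s.1, s.2.1, s.2.2 ++ [rule])) (dl, fl, ol)).1,
       PySem.Set.ofList (rules.foldl (fun (s : List String × List String × List String) rule =>
          if PySem.Str.startswith rule "domain:" then (s.1 ++ [PySem.Str.slice rule (some 7) none], s.2.1, s.2.2)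
          else if PySem.Str.startswith rule "full:" then (s.1, s.2.1 ++ [rule], s.2.2)
          else (s.1, s.2.1, s.2.2 ++ [rule])) (dl, fl, ol)).2.1,
       PySem.Set.ofList (rules.foldl (fun (s : List String × List String × List String) rule =>
          if PySem.Str.startswith rule "domain:" then (s.1 ++ [PySem.Str.slice rule (some 7) none], s.2.1, s.2.2)
          else if PySem.Str.startswith rule "full:" then (s.1, s.2.1 ++ [rule], s.2.2)
          else (s.1, s.2.1, s.2.2 ++ [rule])) (dl, fl, ol)).2.2) := by
  intro rules
  induction rules with
  | nil => intro dl fl ol; rfl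
  | cons r rules ih =>
    intro dl fl ol
    simp only [List.foldl_cons]
    by_cases h1 : PySem.Str.startswith r "domain:" = true
    · rw [if_pos h1, if_pos h1, ← ofList_append_singleton]
      exact ih (dl ++ [PySem.Str.slice r (some 7) none]) fl ol
    · rw [if_neg h1, if_neg h1]
      by_cases h2 : PySem.Str.startswith r "full:" = true
      · rw [if_pos h2, if_pos h2, ← ofList_append_singleton]
        exact ih dl (fl ++ [r]) ol
      · rw [if_neg h2, if_neg h2, ← ofList_append_singleton]
        exact ih dl fl (ol ++ [r])

theorem part_len : ∀ (rules dl fl ol : List String),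
    ((rules.foldl (fun (s : List String × List String × List String) rule =>
        if PySem.Str.startswith rule "domain:" then (s.1 ++ [PySem.Str.slice rule (some 7) none], s.2.1, s.2.2)
        else if PySem.Str.startswith rule "full:" then (s.1, s.2.1 ++ [rule], s.2.2)
        else (s.1, s.2.1, s.2.2 ++ [rule])) (dl, fl, ol)).1.length : Int)
    + ((rules.foldl (fun (s : List String × List String × List String) rule =>
        if PySem.Str.startswith rule "domain:" then (s.1 ++ [PySem.Str.slice rule (some 7) none], s.2.1, s.2.2)
        else if PySem.Str.startswith rule "full:" then (s.1, s.2.1 ++ [rule], s.2.2)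
        else (s.1, s.2.1, s.2.2 ++ [rule])) (dl, fl, ol)).2.1.length : Int)
    + ((rules.foldl (fun (s : List String × List String × List String) rule =>
        if PySem.Str.startswith rule "domain:" then (s.1 ++ [PySem.Str.slice rule (some 7) none], s.2.1, s.2.2)
        else if PySem.Str.startswith rule "full:" then (s.1, s.2.1 ++ [rule], s.2.2)
        else (s.1, s.2.1, s.2.2 ++ [rule])) (dl, fl, ol)).2.2.length : Int)
    = dl.length + fl.length + ol.length + rules.length := by
  intro rules
  induction rules with
  | nil => intro dl fl ol; simp
  | cons r rules ih =>
    intro dl fl ol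
    simp only [List.foldl_cons]
    by_cases h1 : PySem.Str.startswith r "domain:" = true
    · rw [if_pos h1]
      have := ih (dl ++ [PySem.Str.slice r (some 7) none]) fl ol
      rw [this]; simp; ring
    · rw [if_neg h1]
      by_cases h2 : PySem.Str.startswith r "full:" = true
      · rw [if_pos h2]
        have := ih dl (fl ++ [r]) ol
        rw [this]; simp; ring
      · rw [if_neg h2]
        have := ih dl fl (ol ++ [r])
        rw [this]; simp; ring

theorem countP_not_add (S : List String) (p : String → Bool) :
    S.countP (fun x => !p x) + S.countP p = S.length := by
  induction S with
  | nil => simp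
  | cons a S ih =>
    by_cases h : p a = true
    · simp [h]; omega
    · simp [h]; omega

theorem dict_items_lit (T D W K : Int) :
    ((((((((PySem.Dict.empty.insert "total" T).insert "duplicates" 0).insert
      "wildcard_covered" 0).insert "exact_covered" 0).insert "kept" 0).insert "duplicates" D).insert
      "wildcard_covered" W).insert "kept" K).items
    = [("total", T), ("duplicates", D), ("wildcard_covered", W), ("exact_covered", (0:Int)), ("kept", K)] := by
  rfl

theorem ports_eq (rules : List String) : optimize_domains rules = optimize_domains_alt rules := by
  rw [optimize_domains, optimize_domains_alt]
  rw [show (PySem.Set.empty : PySem.Set String) = PySem.Set.ofList [] from rfl]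
  rw [part_eq rules [] [] []]
  simp only []
  set r := rules.foldl (fun (s : List String × List String × List String) rule =>
      if PySem.Str.startswith rule "domain:" then (s.1 ++ [PySem.Str.slice rule (some 7) none], s.2.1, s.2.2)
      else if PySem.Str.startswith rule "full:" then (s.1, s.2.1 ++ [rule], s.2.2)
      else (s.1, s.2.1, s.2.2 ++ [rule])) ([], [], []) with hr
  set S : PySem.Set String := PySem.Set.ofList r.1 with hS
  set F : PySem.Set String := PySem.Set.ofList r.2.1 with hF
  set O : PySem.Set String := PySem.Set.ofList r.2.2 with hO
  set L := PySem.List.sorted2 S (fun x => (pvSplitDot x).length) (fun x => x) with hL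
  have hnodup : S.Nodup := PySem.Set.nodup_ofList r.1
  have hLperm : L.Perm S := PySem.List.sorted2_perm S _ _ false
  have hLpair : L.Pairwise (fun a b => plen a ≤ plen b) := sorted2_pairwise_plen S
  have hg := greedy_go S hnodup L [] [] 0 (by simpa using hLperm) (by simpa using hLpair)
  simp only [List.nil_append, List.filter_nil, zero_add] at hg
  rw [hg]
  have hq : S.filter (fun d => !pvCoveredB S d) = S.filter (fun x => !pvP S x) :=
    List.filter_congr (fun d _ => by rw [coveredB_eq])
  rw [hq]
  have hpermF : ((L.filter (fun x => !pvP S x)).map (fun d => "domain:" ++ d) ++ F ++ O).Perm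
      ((S.filter (fun x => !pvP S x)).map (fun d => "domain:" ++ d) ++ F ++ O) :=
    (((hLperm.filter _).map _).append_right F).append_right O
  have hsortedeq := PySem.List.sorted_eq_sorted_of_perm _ _ (fun x : String => x)
    (fun a b h => h) hpermF
  have hlen : ((L.filter (fun x => !pvP S x)).map (fun d => "domain:" ++ d) ++ F ++ O).length
      = ((S.filter (fun x => !pvP S x)).map (fun d => "domain:" ++ d) ++ F ++ O).length :=
    hpermF.length_eq
  have hcount : (L.countP (fun x => pvP S x) : Int)
      = (S.length : Int) - ((S.filter (fun x => !pvP S x)).map (fun d => "domain:" ++ d)).length := by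
    have h1 : L.countP (fun x => pvP S x) = S.countP (fun x => pvP S x) := hLperm.countP_eq _
    have h2 : ((S.filter (fun x => !pvP S x))).length = S.countP (fun x => !pvP S x) :=
      (List.countP_eq_length_filter).symm
    have h3 := countP_not_add S (fun x => pvP S x)
    simp only [List.length_map, h1, h2]
    omega
  have hdup : ((r.1.length : Int) + (r.2.1.length : Int) + (r.2.2.length : Int))
      = (rules.length : Int) := by
    have := part_len rules [] [] []
    rw [← hr] at this
    simpa using this
  refine Prod.ext ?_ ?_
  · simpa using hsortedeq
  · rw [dict_items_lit, PySem.List.length_sorted, hlen, zero_add, hcount, hdup]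

-- ===== VERDICT (by name: the statement is the Claim_ definition above) =====
theorem optimize_domains_spec : Claim_equal_optimize_domains := by
  intro rules _
  exact ports_eq rules
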